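-- pv_equiv track=rewrite | github.com/AstraZeneca/fragler | src/find_optimal_fragments.py | thinner_cache
-- ===== SOURCE A (Python) =====
-- def thinner_cache(cache):
--     """We will find fragments that makes sence to keep for furher analysis"""
--
--     # step one - remove potential fragments that appear only in 1 string
--     fragments_to_keep = {k: v for k, v in cache_sizes(cache).items() if v > 1}
--
--     # the key idea of the algorithm - keep only the shortest of
--     # the nexted fragments
--     filtered_fragments = filter_nested_fragments(
--         list(fragments_to_keep.keys())
--     )
--     filtered_fragments += filter_nested_fragments(
--         list(fragments_to_keep.keys()),
--         keep_largest=False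
--     )
--     fragments_to_keep = {k: v for k, v in fragments_to_keep.items()
--                          if k in filtered_fragments}
--
--     return filter_fragments(cache, fragments_to_keep)
--
-- def filter_fragments(cache, fragments_to_keep):
--     """
--     Filter fragments from cache
--     """
--     return {k: v for k, v in cache.items()
--             if k in fragments_to_keep}
--
-- def filter_nested_fragments(strs, keep_largest=True):
--     """
--     Remove fragments which contain other fragments
--     so that only the longest nested string remains.
--     Can't find a better way to do it now - refactor.
--     """
--     strs = list(strs)
--     strs.sort()
--
--     inds_to_remove = []
--     for i, pattern in enumerate(strs):
--         for j, target in enumerate(strs):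
--             if i != j and target.find(pattern) != -1:
--                 if keep_largest:
--                     inds_to_remove.append(i)
--                 else:
--                     inds_to_remove.append(j)
--     return [str for i, str in enumerate(strs) if i not in inds_to_remove]
--
-- def cache_sizes(cache):
--     """This function converts cache in a simple dictionary of sizes;
--     sizes in this case means the number of strings in which
--     a potential fragment can appear"""
--     return {k: len(v) for k, v in cache.items()}
-- ===== SOURCE B (Python) =====
-- def thinner_cache(cache):
--     """Substring-enumeration approach: instead of pairwise find() scans, put the
--     multi-occurrence fragments in a hash set, and for each such fragment
--     enumerate all of its substrings and look them up in that set; this yields,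
--     per fragment, whether it strictly contains another fragment and whether it
--     occurs strictly inside another, and we keep it unless both hold."""
--     frags = [k for k, v in cache.items() if len(v) > 1]
--     fragset = set(frags)
--     contained = set()   # fragments occurring strictly inside another fragment
--     has_inner = set()   # fragments strictly containing another fragment
--     for g in frags:
--         inner = {g[i:j] for i in range(len(g) + 1)
--                         for j in range(i, len(g) + 1)} & fragset
--         inner.discard(g)
--         if inner:
--             has_inner.add(g)
--             contained |= inner
--     return {k: v for k, v in cache.items()
--             if k in fragset and (k not in contained or k not in has_inner)}
-- ===== Notes on version B (the rewrite author's own statement) =====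
-- stated objective: faster
-- what changed: A keeps non-nested multi-string fragments by two quadratic pairwise find() passes over sorted copies of the fragment list plus index bookkeeping and a list union; B never compares fragments pairwise: it puts the multi-string fragments in a hash set, enumerates each fragment's substrings once and looks them up in that set, deriving per fragment the two flags 'occurs inside another' / 'contains another' and keeping it unless both hold.
import Mathlib
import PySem

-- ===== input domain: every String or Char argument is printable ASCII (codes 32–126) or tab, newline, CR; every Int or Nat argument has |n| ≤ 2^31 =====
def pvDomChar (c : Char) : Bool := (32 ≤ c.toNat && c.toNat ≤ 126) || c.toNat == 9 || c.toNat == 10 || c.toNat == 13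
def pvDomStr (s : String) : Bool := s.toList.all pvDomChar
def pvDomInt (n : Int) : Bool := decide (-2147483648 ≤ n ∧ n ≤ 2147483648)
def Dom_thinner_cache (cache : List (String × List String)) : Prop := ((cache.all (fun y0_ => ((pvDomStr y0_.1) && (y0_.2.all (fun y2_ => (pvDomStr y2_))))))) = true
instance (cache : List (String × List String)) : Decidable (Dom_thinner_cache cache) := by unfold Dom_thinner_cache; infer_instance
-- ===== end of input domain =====

-- B replaces A's pairwise find() scans over two sorted copies of the fragment list by a
-- substring-enumeration algorithm: each fragment's substrings are enumerated and looked up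
-- in a set of the fragments (objective: faster, measured; return value only — no mutation).
-- Dict arguments/results are association lists with unique keys (Pre_), so the dict
-- comprehensions of both Pythons are ported exactly as filter/map over the list.

-- ===== PORT A =====
def cache_sizes (cache : List (String × List String)) : List (String × Int) :=
  cache.map (fun kv => (kv.1, (kv.2.length : Int)))

def filter_nested_fragments (strs : List String) (keep_largest : Bool) : List String :=
  let strs2 := PySem.List.sorted strs (fun x => x) false
  let inds_to_remove : List Int :=
    (PySem.List.enumerate strs2).foldl (fun acc ip =>
      (PySem.List.enumerate strs2).foldl (fun acc2 jt =>
        if ip.1 ≠ jt.1 ∧ PySem.Str.find jt.2 ip.2 ≠ -1 then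
          acc2 ++ [if keep_largest then ip.1 else jt.1]
        else acc2) acc) []
  (PySem.List.enumerate strs2).foldl (fun acc ip =>
    if ip.1 ∉ inds_to_remove then acc ++ [ip.2] else acc) []

def filter_fragments (cache : List (String × List String)) (fragments_to_keep : List (String × Int)) : List (String × List String) :=
  cache.filter (fun kv => decide (kv.1 ∈ fragments_to_keep.map Prod.fst))

def thinner_cache (cache : List (String × List String)) : List (String × List String) :=
  let fragments_to_keep := (cache_sizes cache).filter (fun kv => decide (1 < kv.2))
  let filtered_fragments :=
    filter_nested_fragments (fragments_to_keep.map Prod.fst) true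
      ++ filter_nested_fragments (fragments_to_keep.map Prod.fst) false
  let fragments_to_keep2 := fragments_to_keep.filter (fun kv => decide (kv.1 ∈ filtered_fragments))
  filter_fragments cache fragments_to_keep2

-- ===== PORT B =====
-- {g[i:j] for i in range(len(g) + 1) for j in range(i, len(g) + 1)}
def pvSubstrings (g : String) : PySem.Set String :=
  (PySem.List.pyRange 0 ((PySem.Str.len g : Int) + 1) 1).foldl (fun acc i =>
    (PySem.List.pyRange i ((PySem.Str.len g : Int) + 1) 1).foldl
      (fun a2 j => PySem.Set.add a2 (PySem.Str.slice g (some i) (some j))) acc)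
    PySem.Set.empty

-- inner = subs & fragset; inner.discard(g)
def pvInner (fragset : PySem.Set String) (g : String) : PySem.Set String :=
  PySem.Set.discard (PySem.Set.inter (pvSubstrings g) fragset) g

def thinner_cache_alt (cache : List (String × List String)) : List (String × List String) :=
  let frags := (cache.filter (fun kv => decide (1 < kv.2.length))).map Prod.fst
  let fragset := PySem.Set.ofList frags
  -- for g in frags: contained |= inner, has_inner.add(g)  (when inner is non-empty)
  let st := frags.foldl (fun (st : PySem.Set String × PySem.Set String) g =>
      let inner := pvInner fragset g
      if inner.isEmpty then st
      else (PySem.Set.union st.1 inner, PySem.Set.add st.2 g))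
    (PySem.Set.empty, PySem.Set.empty)
  cache.filter (fun kv => PySem.Set.contains fragset kv.1 &&
    (!(PySem.Set.contains st.1 kv.1) || !(PySem.Set.contains st.2 kv.1)))

-- ===== PRECONDITION & SPEC =====
-- Pre_ excludes association lists with duplicate keys: they do not represent any Python dict
-- (A's parameter is a dict, whose keys are unique), so A's behaviour on them is undefined.
def Pre_thinner_cache (cache : List (String × List String)) : Prop :=
  (cache.map Prod.fst).Nodup
instance (cache : List (String × List String)) : Decidable (Pre_thinner_cache cache) := by unfold Pre_thinner_cache; infer_instance

def pvWitness_thinner_cache : (List (String × List String)) :=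
  [("ab", ["x", "y"]), ("b", ["x", "z"]), ("zq", ["x"])]

def Spec_thinner_cache (cache : List (String × List String)) (out : List (String × List String)) : Prop := out = thinner_cache_alt cache
instance (cache : List (String × List String)) (out : List (String × List String)) : Decidable (Spec_thinner_cache cache out) := by unfold Spec_thinner_cache; infer_instance

-- ===== CLAIM (what is proved, stated in full; the proofs are below) =====
def Claim_equal_thinner_cache : Prop := ∀ (cache : List (String × List String)), Dom_thinner_cache cache → Pre_thinner_cache cache → Spec_thinner_cache cache (thinner_cache cache)

-- ===== LEMMAS AND PROOFS =====

-- ---- A-side characterisation (as before) ----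

-- indices in an enumeration determine the pair
lemma pv_enum_fst_inj {t : List String} {p q : Int × String}
    (hp : p ∈ PySem.List.enumerate t 0) (hq : q ∈ PySem.List.enumerate t 0)
    (h : p.1 = q.1) : p = q := by
  rw [PySem.List.mem_enumerate_iff] at hp hq
  obtain ⟨k, hk, rfl⟩ := hp; obtain ⟨m, hm, rfl⟩ := hq
  simp_all

-- in an enumeration of a duplicate-free list, the element determines the pair
lemma pv_enum_snd_inj {t : List String} (ht : t.Nodup) {p q : Int × String}
    (hp : p ∈ PySem.List.enumerate t 0) (hq : q ∈ PySem.List.enumerate t 0)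
    (h : p.2 = q.2) : p = q := by
  rw [PySem.List.mem_enumerate_iff] at hp hq
  obtain ⟨k, hk, rfl⟩ := hp; obtain ⟨m, hm, rfl⟩ := hq
  simp_all [List.Nodup.getElem_inj_iff ht]

lemma pv_mem_iff_enum {t : List String} {y : String} :
    y ∈ t ↔ ∃ p ∈ PySem.List.enumerate t 0, p.2 = y := by
  constructor
  · intro hy
    obtain ⟨k, hk, rfl⟩ := List.mem_iff_getElem.mp hy
    refine ⟨((0 : Int) + k, t[k]), ?_, rfl⟩
    rw [PySem.List.mem_enumerate_iff]
    exact ⟨k, hk, rfl⟩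
  · rintro ⟨p, hp, rfl⟩
    rw [PySem.List.mem_enumerate_iff] at hp
    obtain ⟨k, hk, rfl⟩ := hp
    exact List.getElem_mem hk

-- membership characterisation of A's filter_nested_fragments on a duplicate-free input
lemma pv_fnf_mem (strs : List String) (kl : Bool) (h : strs.Nodup) (x : String) :
    x ∈ filter_nested_fragments strs kl ↔
      x ∈ strs ∧ ¬ ∃ g, g ∈ strs ∧ g ≠ x ∧
        (if kl then x.toList <:+: g.toList else g.toList <:+: x.toList) := by
  set t := PySem.List.sorted strs (fun x => x) false with htdef
  have ht : t.Nodup := (PySem.List.sorted_perm strs (fun x => x) false).nodup_iff.mpr h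
  have htm : ∀ y : String, y ∈ t ↔ y ∈ strs := fun y => PySem.List.mem_sorted strs (fun x => x) false y
  have hdef : filter_nested_fragments strs kl =
      (PySem.List.enumerate t).foldl (fun acc ip =>
        if ip.1 ∉ (PySem.List.enumerate t).foldl (fun acc ip =>
            (PySem.List.enumerate t).foldl (fun acc2 jt =>
              if ip.1 ≠ jt.1 ∧ PySem.Str.find jt.2 ip.2 ≠ -1 then
                acc2 ++ [if kl then ip.1 else jt.1] else acc2) acc) []
        then acc ++ [ip.2] else acc) [] := rfl
  have hinner : ∀ (acc : List Int) (ip : Int × String),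
      (PySem.List.enumerate t).foldl (fun acc2 jt =>
          if ip.1 ≠ jt.1 ∧ PySem.Str.find jt.2 ip.2 ≠ -1 then
            acc2 ++ [if kl then ip.1 else jt.1] else acc2) acc
        = acc ++ ((PySem.List.enumerate t).filter
            (fun jt => decide (ip.1 ≠ jt.1 ∧ PySem.Str.find jt.2 ip.2 ≠ -1))).map
            (fun jt => if kl then ip.1 else jt.1) := by
    intro acc ip
    exact PySem.List.foldl_append_ite
      (fun jt => ip.1 ≠ jt.1 ∧ PySem.Str.find jt.2 ip.2 ≠ -1)
      (fun jt => if kl then ip.1 else jt.1) (PySem.List.enumerate t) acc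
  have hI : (PySem.List.enumerate t).foldl (fun acc ip =>
      (PySem.List.enumerate t).foldl (fun acc2 jt =>
          if ip.1 ≠ jt.1 ∧ PySem.Str.find jt.2 ip.2 ≠ -1 then
            acc2 ++ [if kl then ip.1 else jt.1] else acc2) acc) []
      = (PySem.List.enumerate t).flatMap (fun ip =>
          ((PySem.List.enumerate t).filter
            (fun jt => decide (ip.1 ≠ jt.1 ∧ PySem.Str.find jt.2 ip.2 ≠ -1))).map
            (fun jt => if kl then ip.1 else jt.1)) := by
    trans ((PySem.List.enumerate t).foldl (fun acc ip => acc ++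
        ((PySem.List.enumerate t).filter
          (fun jt => decide (ip.1 ≠ jt.1 ∧ PySem.Str.find jt.2 ip.2 ≠ -1))).map
          (fun jt => if kl then ip.1 else jt.1)) [])
    · exact PySem.List.foldl_congr_mem _ _ _ _ (fun acc ip _ => hinner acc ip)
    · rw [PySem.List.foldl_append_eq_flatMap]
      simp
  set I := (PySem.List.enumerate t).flatMap (fun ip =>
      ((PySem.List.enumerate t).filter
        (fun jt => decide (ip.1 ≠ jt.1 ∧ PySem.Str.find jt.2 ip.2 ≠ -1))).map
        (fun jt => if kl then ip.1 else jt.1)) with hIdef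
  have hIin : ∀ i : Int, i ∈ I ↔ ∃ ip ∈ PySem.List.enumerate t 0, ∃ jt ∈ PySem.List.enumerate t 0,
      ip.1 ≠ jt.1 ∧ PySem.Str.find jt.2 ip.2 ≠ -1 ∧ (if kl then ip.1 else jt.1) = i := by
    intro i
    rw [hIdef]
    simp only [List.mem_flatMap, List.mem_map, List.mem_filter, decide_eq_true_eq]
    constructor
    · rintro ⟨ip, hip, jt, ⟨hjt, hc1, hc2⟩, hidx⟩
      exact ⟨ip, hip, jt, hjt, hc1, hc2, hidx⟩
    · rintro ⟨ip, hip, jt, hjt, hc1, hc2, hidx⟩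
      exact ⟨ip, hip, jt, ⟨hjt, hc1, hc2⟩, hidx⟩
  rw [hdef, hI]
  rw [PySem.List.foldl_append_ite (fun ip : Int × String => ip.1 ∉ I) (fun ip => ip.2)]
  simp only [List.nil_append, List.mem_map, List.mem_filter, decide_eq_true_eq]
  constructor
  · rintro ⟨ip, ⟨hip, hnotin⟩, rfl⟩
    refine ⟨(htm _).mp (pv_mem_iff_enum.mpr ⟨ip, hip, rfl⟩), ?_⟩
    rintro ⟨g, hg, hgf, hrel⟩
    obtain ⟨jt, hjt, hjg⟩ := pv_mem_iff_enum.mp ((htm g).mpr hg)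
    have hne : ip.1 ≠ jt.1 := by
      intro he
      exact hgf (by rw [← hjg, pv_enum_fst_inj hjt hip he.symm])
    apply hnotin
    rw [hIin]
    cases kl with
    | true =>
      refine ⟨ip, hip, jt, hjt, hne, ?_, rfl⟩
      rw [PySem.Str.find_ne_neg_one_iff, hjg]
      simpa using hrel
    | false =>
      refine ⟨jt, hjt, ip, hip, hne.symm, ?_, rfl⟩
      rw [PySem.Str.find_ne_neg_one_iff, hjg]
      simpa using hrel
  · rintro ⟨hxs, hno⟩
    obtain ⟨ip, hip, hipx⟩ := pv_mem_iff_enum.mp ((htm x).mpr hxs)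
    refine ⟨ip, ⟨hip, ?_⟩, hipx⟩
    intro hin
    obtain ⟨ip', hip', jt', hjt', hne, hfind, hidx⟩ := (hIin ip.1).mp hin
    rw [PySem.Str.find_ne_neg_one_iff] at hfind
    cases kl with
    | true =>
      have he : ip' = ip := pv_enum_fst_inj hip' hip (by simpa using hidx)
      subst he
      have hgx : jt'.2 ≠ x := by
        intro hgx
        exact hne ((pv_enum_snd_inj ht hip' hjt' (by rw [hipx, ← hgx])).symm ▸ rfl)
      refine hno ⟨jt'.2, (htm _).mp (pv_mem_iff_enum.mpr ⟨jt', hjt', rfl⟩), hgx, ?_⟩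
      rw [if_pos rfl]
      rw [← hipx]
      exact hfind
    | false =>
      have he : jt' = ip := pv_enum_fst_inj hjt' hip (by simpa using hidx)
      subst he
      have hgx : ip'.2 ≠ x := by
        intro hgx
        exact hne ((pv_enum_snd_inj ht hip' hjt' (by rw [hipx, ← hgx])) ▸ rfl)
      refine hno ⟨ip'.2, (htm _).mp (pv_mem_iff_enum.mpr ⟨ip', hip', rfl⟩), hgx, ?_⟩
      rw [if_neg (by simp)]
      rw [← hipx]
      exact hfind

-- pulling `.map Prod.fst` through a filter on the key
lemma pv_map_fst_filter {α β : Type} (l : List (α × β)) (p : α → Bool) :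
    (l.filter (fun kv => p kv.1)).map Prod.fst = (l.map Prod.fst).filter p := by
  rw [List.filter_map]
  rfl

-- ---- B-side characterisation ----

-- membership in a nested fold of Set.add
lemma pv_mem_nested_add (l : List Int) (h : Int → List Int) (f : Int → Int → String)
    (s : PySem.Set String) (y : String) :
    y ∈ l.foldl (fun acc i => (h i).foldl (fun a2 j => PySem.Set.add a2 (f i j)) acc) s ↔
      y ∈ s ∨ ∃ i ∈ l, ∃ j ∈ h i, y = f i j := by
  induction l generalizing s with
  | nil => simp
  | cons a l ih =>
    rw [List.foldl_cons, ih, PySem.Set.mem_foldl_add]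
    constructor
    · rintro ((hy | ⟨j, hj, rfl⟩) | ⟨i, hi, j, hj, rfl⟩)
      · exact Or.inl hy
      · exact Or.inr ⟨a, List.mem_cons_self, j, hj, rfl⟩
      · exact Or.inr ⟨i, List.mem_cons_of_mem _ hi, j, hj, rfl⟩
    · rintro (hy | ⟨i, hi, j, hj, rfl⟩)
      · exact Or.inl (Or.inl hy)
      · rcases List.mem_cons.mp hi with rfl | hi
        · exact Or.inl (Or.inr ⟨j, hj, rfl⟩)
        · exact Or.inr ⟨i, hi, j, hj, rfl⟩

-- the substring set of g holds exactly the infixes of g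
lemma pv_mem_substrings (g y : String) :
    y ∈ pvSubstrings g ↔ y.toList <:+: g.toList := by
  unfold pvSubstrings
  rw [pv_mem_nested_add]
  simp only [PySem.Set.empty, List.not_mem_nil, false_or, PySem.List.mem_pyRange_one,
    PySem.Str.len_eq]
  constructor
  · rintro ⟨i, hi, j, hj, rfl⟩
    have h0i : 0 ≤ i := hi.1
    have h0j : 0 ≤ j := le_trans h0i hj.1
    have hsl : (PySem.Str.slice g (some i) (some j)).toList
        = (g.toList.drop i.toNat).take (j.toNat - i.toNat) := by
      simp [PySem.List.slice_toNat _ h0i h0j]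
    rw [hsl]
    exact ((List.take_prefix _ _).isInfix).trans ((List.drop_suffix _ _).isInfix)
  · rintro ⟨t₁, t₂, hsplit⟩
    refine ⟨(t₁.length : Int), ?_, ((t₁.length + y.toList.length : Nat) : Int), ?_, ?_⟩
    · have : t₁.length + y.toList.length ≤ g.toList.length := by
        rw [← hsplit]; simp
      omega
    · have : t₁.length + y.toList.length ≤ g.toList.length := by
        rw [← hsplit]; simp
      push_cast
      omega
    · apply String.toList_injective
      have hsl : (PySem.Str.slice g (some (t₁.length : Int))
          (some ((t₁.length + y.toList.length : Nat) : Int))).toList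
          = (g.toList.drop t₁.length).take (t₁.length + y.toList.length - t₁.length) := by
        simp only [PySem.Str.toList_slice, PySem.Chars.slice_eq_listSlice]
        exact PySem.List.slice_natCast g.toList t₁.length (t₁.length + y.toList.length)
      rw [hsl, ← hsplit]
      simp

-- membership in B's inner set
lemma pv_mem_inner (F : List String) (g y : String) :
    y ∈ pvInner (PySem.Set.ofList F) g ↔ y.toList <:+: g.toList ∧ y ∈ F ∧ y ≠ g := by
  unfold pvInner
  rw [PySem.Set.mem_discard, PySem.Set.mem_inter, PySem.Set.mem_ofList, pv_mem_substrings]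
  tauto

-- the state of B's loop, characterised memberwise
lemma pv_fold_state (l : List String) (I : String → PySem.Set String)
    (s1 s2 : PySem.Set String) (y : String) :
    (y ∈ (l.foldl (fun (st : PySem.Set String × PySem.Set String) g =>
        if (I g).isEmpty then st
        else (PySem.Set.union st.1 (I g), PySem.Set.add st.2 g)) (s1, s2)).1
      ↔ y ∈ s1 ∨ ∃ g ∈ l, y ∈ I g) ∧
    (y ∈ (l.foldl (fun (st : PySem.Set String × PySem.Set String) g =>
        if (I g).isEmpty then st
        else (PySem.Set.union st.1 (I g), PySem.Set.add st.2 g)) (s1, s2)).2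
      ↔ y ∈ s2 ∨ ∃ g ∈ l, I g ≠ [] ∧ y = g) := by
  induction l generalizing s1 s2 with
  | nil => simp
  | cons a l ih =>
    rw [List.foldl_cons]
    by_cases ha : (I a).isEmpty
    · rw [if_pos ha]
      have hae : I a = [] := List.isEmpty_iff.mp ha
      obtain ⟨ih1, ih2⟩ := ih s1 s2
      rw [ih1, ih2]
      constructor
      · constructor
        · rintro (h | ⟨g, hg, hy⟩)
          · exact Or.inl h
          · exact Or.inr ⟨g, List.mem_cons_of_mem _ hg, hy⟩
        · rintro (h | ⟨g, hg, hy⟩)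
          · exact Or.inl h
          · rcases List.mem_cons.mp hg with rfl | hg
            · rw [hae] at hy; simp at hy
            · exact Or.inr ⟨g, hg, hy⟩
      · constructor
        · rintro (h | ⟨g, hg, hy⟩)
          · exact Or.inl h
          · exact Or.inr ⟨g, List.mem_cons_of_mem _ hg, hy⟩
        · rintro (h | ⟨g, hg, hne, hy⟩)
          · exact Or.inl h
          · rcases List.mem_cons.mp hg with rfl | hg
            · exact absurd hae hne
            · exact Or.inr ⟨g, hg, hne, hy⟩
    · rw [if_neg ha]
      have hane : I a ≠ [] := by
        intro he; exact ha (by simp [he])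
      obtain ⟨ih1, ih2⟩ := ih (PySem.Set.union s1 (I a)) (PySem.Set.add s2 a)
      rw [ih1, ih2]
      simp only [PySem.Set.mem_union, PySem.Set.mem_add]
      constructor
      · constructor
        · rintro ((h | h) | ⟨g, hg, hy⟩)
          · exact Or.inl h
          · exact Or.inr ⟨a, List.mem_cons_self, h⟩
          · exact Or.inr ⟨g, List.mem_cons_of_mem _ hg, hy⟩
        · rintro (h | ⟨g, hg, hy⟩)
          · exact Or.inl (Or.inl h)
          · rcases List.mem_cons.mp hg with rfl | hg
            · exact Or.inl (Or.inr hy)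
            · exact Or.inr ⟨g, hg, hy⟩
      · constructor
        · rintro ((h | h) | ⟨g, hg, hy⟩)
          · exact Or.inl h
          · exact Or.inr ⟨a, List.mem_cons_self, hane, h⟩
          · exact Or.inr ⟨g, List.mem_cons_of_mem _ hg, hy⟩
        · rintro (h | ⟨g, hg, hne, hy⟩)
          · exact Or.inl (Or.inl h)
          · rcases List.mem_cons.mp hg with rfl | hg
            · exact Or.inl (Or.inr hy)
            · exact Or.inr ⟨g, hg, hne, hy⟩

-- ===== VERDICT =====
theorem thinner_cache_spec : Claim_equal_thinner_cache := by
  intro cache _ hpre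
  have hsizes : (cache_sizes cache).filter (fun kv => decide (1 < kv.2)) =
      (cache.filter (fun kv => decide (1 < kv.2.length))).map (fun kv => (kv.1, (kv.2.length : Int))) := by
    unfold cache_sizes
    rw [List.filter_map]
    congr 1
    apply List.filter_congr
    intro kv _
    simp
  have hkeysF : ((cache_sizes cache).filter (fun kv => decide (1 < kv.2))).map Prod.fst =
      (cache.filter (fun kv => decide (1 < kv.2.length))).map Prod.fst := by
    rw [hsizes, List.map_map]
    rfl
  set F : List String := (cache.filter (fun kv => decide (1 < kv.2.length))).map Prod.fst with hFdef
  have hFnodup : F.Nodup := by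
    apply List.Nodup.sublist _ hpre
    exact List.Sublist.map Prod.fst List.filter_sublist
  -- closed forms of B's two state sets
  have hc1 : ∀ y : String, y ∈ ((F.foldl (fun (st : PySem.Set String × PySem.Set String) g =>
        if (pvInner (PySem.Set.ofList F) g).isEmpty then st
        else (PySem.Set.union st.1 (pvInner (PySem.Set.ofList F) g), PySem.Set.add st.2 g))
      (PySem.Set.empty, PySem.Set.empty)).1)
      ↔ ∃ g ∈ F, y ∈ pvInner (PySem.Set.ofList F) g := by
    intro y
    have h := (pv_fold_state F (pvInner (PySem.Set.ofList F)) PySem.Set.empty PySem.Set.empty y).1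
    simpa [PySem.Set.empty] using h
  have hc2 : ∀ y : String, y ∈ ((F.foldl (fun (st : PySem.Set String × PySem.Set String) g =>
        if (pvInner (PySem.Set.ofList F) g).isEmpty then st
        else (PySem.Set.union st.1 (pvInner (PySem.Set.ofList F) g), PySem.Set.add st.2 g))
      (PySem.Set.empty, PySem.Set.empty)).2)
      ↔ ∃ g ∈ F, pvInner (PySem.Set.ofList F) g ≠ [] ∧ y = g := by
    intro y
    have h := (pv_fold_state F (pvInner (PySem.Set.ofList F)) PySem.Set.empty PySem.Set.empty y).2
    simpa [PySem.Set.empty] using h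
  -- the two key predicates agree pointwise
  have hcond : ∀ kv : String × List String, kv ∈ cache →
      decide (kv.1 ∈ ((((cache_sizes cache).filter (fun kv => decide (1 < kv.2))).filter
          (fun kv => decide (kv.1 ∈ filter_nested_fragments F true ++ filter_nested_fragments F false))).map Prod.fst)) =
      (PySem.Set.contains (PySem.Set.ofList F) kv.1 &&
        (!(PySem.Set.contains ((F.foldl (fun (st : PySem.Set String × PySem.Set String) g =>
            if (pvInner (PySem.Set.ofList F) g).isEmpty then st
            else (PySem.Set.union st.1 (pvInner (PySem.Set.ofList F) g), PySem.Set.add st.2 g))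
          (PySem.Set.empty, PySem.Set.empty)).1) kv.1) ||
         !(PySem.Set.contains ((F.foldl (fun (st : PySem.Set String × PySem.Set String) g =>
            if (pvInner (PySem.Set.ofList F) g).isEmpty then st
            else (PySem.Set.union st.1 (pvInner (PySem.Set.ofList F) g), PySem.Set.add st.2 g))
          (PySem.Set.empty, PySem.Set.empty)).2) kv.1))) := by
    intro kv _
    set f := kv.1
    rw [Bool.eq_iff_iff]
    rw [pv_map_fst_filter ((cache_sizes cache).filter (fun kv => decide (1 < kv.2)))
      (fun k => decide (k ∈ filter_nested_fragments F true ++ filter_nested_fragments F false))]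
    simp only [decide_eq_true_eq, List.mem_filter, hkeysF, Bool.and_eq_true,
      Bool.or_eq_true, Bool.not_eq_true', ← Bool.not_eq_true,
      PySem.Set.contains_iff, PySem.Set.mem_ofList,
      hc1, hc2, List.mem_append, pv_fnf_mem F true hFnodup, pv_fnf_mem F false hFnodup,
      pv_mem_inner]
    constructor
    · rintro ⟨hfF, h⟩
      refine ⟨hfF, ?_⟩
      rcases h with ⟨-, hno⟩ | ⟨-, hno⟩
      · left
        rintro ⟨g, hg, hin, -, hne⟩
        exact hno ⟨g, hg, fun he => hne he.symm, by simpa using hin⟩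
      · right
        rintro ⟨g, hg, hinner, hfg⟩
        obtain ⟨s, hs⟩ := List.exists_mem_of_ne_nil _ hinner
        obtain ⟨hin, hsF, hne⟩ := (pv_mem_inner F g s).mp hs
        refine hno ⟨s, hsF, ?_, ?_⟩
        · rw [hfg]; exact hne
        · simp only [if_neg (by simp : ¬ (false = true))]
          rw [hfg]; exact hin
    · rintro ⟨hfF, h⟩
      refine ⟨hfF, ?_⟩
      rcases h with hno | hno
      · left
        refine ⟨hfF, ?_⟩
        rintro ⟨g, hg, hne, hin⟩
        exact hno ⟨g, hg, by simpa using hin, hfF, fun he => hne he.symm⟩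
      · right
        refine ⟨hfF, ?_⟩
        rintro ⟨g, hg, hne, hin⟩
        have hgm : g ∈ pvInner (PySem.Set.ofList F) f :=
          (pv_mem_inner F f g).mpr ⟨by simpa using hin, hg, hne⟩
        exact hno ⟨f, hfF, List.ne_nil_of_mem hgm, rfl⟩
  show Spec_thinner_cache cache (thinner_cache cache)
  unfold Spec_thinner_cache
  simp only [thinner_cache, thinner_cache_alt, filter_fragments, hkeysF, ← hFdef]
  exact List.filter_congr hcond
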